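-- pv_equiv track=rewrite | github.com/JaoharRaihan/Sports-Template-using-SQL | rc/cf.py | illuminate_trophies
-- ===== SOURCE A (Python) =====
-- def illuminate_trophies(n, s):
--     left = False
--     right = False
--
--     for i in range(n):
--         if s[i] == "L":
--             left = True
--         elif s[i] == "R":
--             right = True
--
--         if left and right:
--             return i+1
--
--     return -1
-- ===== SOURCE B (Python) =====
-- def illuminate_trophies(n, s):
--     p = s[:max(n, 0)]
--     l = p.find("L")
--     r = p.find("R")
--     if l == -1 or r == -1:
--         return -1
--     return max(l, r) + 1
-- ===== Notes on version B (the rewrite author's own statement) =====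
-- stated objective: simpler
-- what changed: Replaces the stateful early-exit scan with two independent first-occurrence searches (str.find, C-level) over the prefix: the answer is max(first 'L', first 'R') + 1 within s[:n], or -1 if either is absent.
import Mathlib
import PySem

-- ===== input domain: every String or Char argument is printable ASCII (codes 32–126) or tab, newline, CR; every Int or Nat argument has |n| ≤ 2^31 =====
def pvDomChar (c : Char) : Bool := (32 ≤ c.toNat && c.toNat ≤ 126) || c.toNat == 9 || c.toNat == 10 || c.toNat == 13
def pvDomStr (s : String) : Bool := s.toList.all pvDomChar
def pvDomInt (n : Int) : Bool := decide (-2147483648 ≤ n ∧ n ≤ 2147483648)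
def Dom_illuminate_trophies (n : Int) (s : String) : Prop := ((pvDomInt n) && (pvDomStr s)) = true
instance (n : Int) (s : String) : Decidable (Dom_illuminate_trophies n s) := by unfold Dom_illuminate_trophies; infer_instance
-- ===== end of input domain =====

-- B replaces A's stateful early-exit scan by two independent first-occurrence searches
-- over the prefix (objective: simpler).

-- ===== PORT A =====
-- the for-loop over range(n): fuel counts remaining iterations, i is the current index
def illuminateGo (cs : List Char) : Nat → Nat → Bool → Bool → Int
  | 0, _, _, _ => -1
  | fuel + 1, i, left, right =>
    match PySem.List.pyGet? cs (i : Int) with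
    | none => -1   -- Python raises IndexError here; such inputs are outside Pre_
    | some c =>
      let left := if c = 'L' then true else left
      let right := if c = 'L' then right else if c = 'R' then true else right
      if left && right then (i : Int) + 1 else illuminateGo cs fuel (i + 1) left right

def illuminate_trophies (n : Int) (s : String) : Int :=
  illuminateGo s.toList n.toNat 0 false false

-- ===== PORT B =====
def illuminate_trophies_alt (n : Int) (s : String) : Int :=
  let p := PySem.Str.slice s none (some (max n 0))
  let l := PySem.Str.find p "L"
  let r := PySem.Str.find p "R"
  if l = -1 || r = -1 then -1 else max l r + 1

-- ===== PRECONDITION & SPEC =====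
-- Pre_ excludes exactly the inputs on which A raises IndexError: n runs past the end of s
-- before both 'L' and 'R' have been seen.
def Pre_illuminate_trophies (n : Int) (s : String) : Prop :=
  n ≤ (s.toList.length : Int) ∨ ('L' ∈ s.toList ∧ 'R' ∈ s.toList)
instance (n : Int) (s : String) : Decidable (Pre_illuminate_trophies n s) := by
  unfold Pre_illuminate_trophies; infer_instance
def pvWitness_illuminate_trophies : Int × String := (2, "LR")

def Spec_illuminate_trophies (n : Int) (s : String) (out : Int) : Prop := out = illuminate_trophies_alt n s
instance (n : Int) (s : String) (out : Int) : Decidable (Spec_illuminate_trophies n s out) := by unfold Spec_illuminate_trophies; infer_instance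

-- ===== CLAIM (what is proved, stated in full; the proofs are below) =====
def Claim_equal_illuminate_trophies : Prop := ∀ (n : Int) (s : String), Dom_illuminate_trophies n s → Pre_illuminate_trophies n s → Spec_illuminate_trophies n s (illuminate_trophies n s)

-- ===== LEMMAS AND PROOFS =====

-- proof-side model of A's loop body as a structural recursion over the prefix itself
def pvScan : List Char → Bool → Bool → Nat → Int
  | [], _, _, _ => -1
  | c :: t, l, r, k =>
    let l' := if c = 'L' then true else l
    let r' := if c = 'L' then r else if c = 'R' then true else r
    if l' && r' then (k : Int) + 1 else pvScan t l' r' (k + 1)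

theorem illuminateGo_eq_pvScan (cs : List Char) (fuel k : Nat) (l r : Bool) :
    illuminateGo cs fuel k l r = pvScan ((cs.drop k).take fuel) l r k := by
  induction fuel generalizing k l r with
  | zero => simp [illuminateGo, pvScan]
  | succ fuel ih =>
    by_cases hk : k < cs.length
    · have hdrop : cs.drop k = cs[k] :: cs.drop (k + 1) := List.drop_eq_getElem_cons hk
      simp only [illuminateGo, PySem.List.pyGet?_natCast, List.getElem?_eq_getElem hk,
        hdrop, List.take_succ_cons, pvScan]
      have hcast : ((k : Int) + 1) = (((k + 1 : Nat)) : Int) := by push_cast; ring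
      simp only [ih, hcast]
    · have hnone : cs[k]? = none := by rw [List.getElem?_eq_none_iff]; omega
      have hnil : cs.drop k = [] := List.drop_eq_nil_of_le (by omega)
      simp [illuminateGo, PySem.List.pyGet?_natCast, hnone, hnil, pvScan]

theorem pvScan_true_false (p : List Char) (k : Nat) :
    pvScan p true false k = if 'R' ∈ p then ((k + p.idxOf 'R' : Nat) : Int) + 1 else -1 := by
  induction p generalizing k with
  | nil => simp [pvScan]
  | cons c t ih =>
    by_cases hc : c = 'R'
    · subst hc; simp [pvScan, List.idxOf_cons_self]
    · have hc' : 'R' ≠ c := Ne.symm hc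
      have hstep : pvScan (c :: t) true false k = pvScan t true false (k + 1) := by
        by_cases hL : c = 'L' <;> simp [pvScan, hL, hc]
      have hb : (c == 'R') = false := by simp [hc]
      have hi : (c :: t).idxOf 'R' = t.idxOf 'R' + 1 := by
        simp [List.idxOf_cons, hb]
      rw [hstep, ih, hi]
      by_cases hm : 'R' ∈ t <;> simp [hm, hc'] <;> push_cast <;> ring

theorem pvScan_false_true (p : List Char) (k : Nat) :
    pvScan p false true k = if 'L' ∈ p then ((k + p.idxOf 'L' : Nat) : Int) + 1 else -1 := by
  induction p generalizing k with
  | nil => simp [pvScan]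
  | cons c t ih =>
    by_cases hc : c = 'L'
    · subst hc; simp [pvScan, List.idxOf_cons_self]
    · have hc' : 'L' ≠ c := Ne.symm hc
      have hstep : pvScan (c :: t) false true k = pvScan t false true (k + 1) := by
        by_cases hR : c = 'R' <;> simp [pvScan, hc, hR]
      have hb : (c == 'L') = false := by simp [hc]
      have hi : (c :: t).idxOf 'L' = t.idxOf 'L' + 1 := by
        simp [List.idxOf_cons, hb]
      rw [hstep, ih, hi]
      by_cases hm : 'L' ∈ t <;> simp [hm, hc'] <;> push_cast <;> ring

theorem pvScan_false_false (p : List Char) (k : Nat) :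
    pvScan p false false k =
      if 'L' ∈ p ∧ 'R' ∈ p
      then ((k + max (p.idxOf 'L') (p.idxOf 'R') : Nat) : Int) + 1 else -1 := by
  induction p generalizing k with
  | nil => simp [pvScan]
  | cons c t ih =>
    by_cases hL : c = 'L'
    · subst hL
      have hstep : pvScan ('L' :: t) false false k = pvScan t true false (k + 1) := by
        simp [pvScan]
      have hi : ('L' :: t).idxOf 'R' = t.idxOf 'R' + 1 := by simp [List.idxOf_cons]
      rw [hstep, pvScan_true_false, hi]
      by_cases hm : 'R' ∈ t <;> simp [hm, List.idxOf_cons_self] <;> push_cast <;> omega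
    · by_cases hR : c = 'R'
      · subst hR
        have hstep : pvScan ('R' :: t) false false k = pvScan t false true (k + 1) := by
          simp [pvScan]
        have hi : ('R' :: t).idxOf 'L' = t.idxOf 'L' + 1 := by simp [List.idxOf_cons]
        rw [hstep, pvScan_false_true, hi]
        by_cases hm : 'L' ∈ t <;> simp [hm, List.idxOf_cons_self, hL] <;> push_cast <;> omega
      · have hL' : 'L' ≠ c := Ne.symm hL
        have hR' : 'R' ≠ c := Ne.symm hR
        have hstep : pvScan (c :: t) false false k = pvScan t false false (k + 1) := by
          simp [pvScan, hL, hR]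
        have hbL : (c == 'L') = false := by simp [hL]
        have hbR : (c == 'R') = false := by simp [hR]
        have hiL : (c :: t).idxOf 'L' = t.idxOf 'L' + 1 := by
          simp [List.idxOf_cons, hbL]
        have hiR : (c :: t).idxOf 'R' = t.idxOf 'R' + 1 := by
          simp [List.idxOf_cons, hbR]
        rw [hstep, ih, hiL, hiR]
        by_cases hmL : 'L' ∈ t <;> by_cases hmR : 'R' ∈ t <;>
          simp [hmL, hmR, hL', hR'] <;> push_cast <;> omega

-- idxOf is minimal among indices holding c
theorem idxOf_min (p : List Char) (c : Char) :
    ∀ j, (hj : j < p.length) → p[j] = c → p.idxOf c ≤ j := by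
  induction p with
  | nil => simp
  | cons a t ih =>
    intro j hj h
    by_cases ha : a = c
    · simp [ha, List.idxOf_cons_self]
    · have hb : (a == c) = false := by simp [ha]
      cases j with
      | zero => simp_all
      | succ j =>
        simp only [List.idxOf_cons, hb, cond_false]
        have := ih j (by simpa using hj) (by simpa using h)
        omega

theorem singleton_prefix_drop (p : List Char) (c : Char) (j : Nat) (hj : j < p.length)
    (h : p[j] = c) : [c] <+: p.drop j := by
  rw [List.drop_eq_getElem_cons hj, h]
  exact ⟨p.drop (j + 1), rfl⟩

-- s.find(c) for a single character, as first index or -1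
theorem find_singleton (p : List Char) (c : Char) :
    PySem.Chars.find p [c] = if c ∈ p then (p.idxOf c : Int) else -1 := by
  by_cases hm : c ∈ p
  · obtain ⟨u, v, rfl⟩ := List.append_of_mem hm
    set p := u ++ c :: v with hp
    have hm : c ∈ p := by simp [hp]
    have hin : [c] <:+: p := ⟨u, v, by simp [hp]⟩
    have hnn : 0 ≤ PySem.Chars.find p [c] := (PySem.Chars.find_nonneg_iff _ _).mpr hin
    obtain ⟨hpre, hmin⟩ := PySem.Chars.find_spec hnn
    set f := (PySem.Chars.find p [c]).toNat with hf
    have hidx : p.idxOf c < p.length := List.idxOf_lt_length_of_mem hm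
    -- f is an index holding c
    obtain ⟨w, hw⟩ := hpre
    have hfl : f < p.length := by
      have := congrArg List.length hw
      simp [List.length_drop] at this
      omega
    have hfc : p[f] = c := by
      have h0 : (p.drop f)[0]? = some c := by rw [← hw]; rfl
      rw [List.getElem?_drop, List.getElem?_eq_getElem (by omega)] at h0
      simpa using h0
    -- so idxOf ≤ f, and minimality of f gives f ≤ idxOf
    have h1 : p.idxOf c ≤ f := idxOf_min p c f hfl hfc
    have h2 : ¬ p.idxOf c < f := fun hlt =>
      hmin (p.idxOf c) hlt (singleton_prefix_drop p c _ hidx (List.getElem_idxOf hidx))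
    have : f = p.idxOf c := by omega
    simp only [hm, if_pos]
    omega
  · have : ¬ [c] <:+: p := by
      intro ⟨u, v, hv⟩
      exact hm (by rw [← hv]; simp)
    simp [hm, (PySem.Chars.find_eq_neg_one_iff _ _).mpr this]

theorem illuminate_trophies_spec : Claim_equal_illuminate_trophies := by
  intro n s _ _
  unfold Spec_illuminate_trophies illuminate_trophies illuminate_trophies_alt
  have hA : illuminateGo s.toList n.toNat 0 false false
      = pvScan (s.toList.take n.toNat) false false 0 := by
    simpa using illuminateGo_eq_pvScan s.toList n.toNat 0 false false
  rw [hA, pvScan_false_false]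
  have hslice : (PySem.Str.slice s none (some (max n 0))).toList = s.toList.take n.toNat := by
    have h0 : (0 : Int) ≤ max n 0 := le_max_right _ _
    have : (max n 0).toNat = n.toNat := by omega
    simp [PySem.List.slice_to s.toList h0, this]
  set p := s.toList.take n.toNat with hp
  have hfindL : PySem.Str.find (PySem.Str.slice s none (some (max n 0))) "L"
      = if 'L' ∈ p then (p.idxOf 'L' : Int) else -1 := by
    rw [PySem.Str.find_eq, hslice]
    simpa using find_singleton p 'L'
  have hfindR : PySem.Str.find (PySem.Str.slice s none (some (max n 0))) "R"
      = if 'R' ∈ p then (p.idxOf 'R' : Int) else -1 := by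
    rw [PySem.Str.find_eq, hslice]
    simpa using find_singleton p 'R'
  simp only [hfindL, hfindR]
  by_cases hL : 'L' ∈ p <;> by_cases hR : 'R' ∈ p <;> simp [hL, hR] <;> push_cast <;> omega
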